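-- pv_equiv track=rewrite | github.com/sunny-ops/Amazon_OA | Maximum Number of Balanced Shipments.py | maxNumberOfBalancedShipments
-- ===== SOURCE A (Python) =====
-- def maxNumberOfBalancedShipments(weight):
--       n = len(weight)
--       f = [0] * n
--       for i in range(n):
--           prefix_max = weight[i]
--           j = i - 1
--           while j >= 0:
--               prefix_max = max(prefix_max, weight[j])
--               if prefix_max > weight[i]:
--                   f[i] = max(f[i], 1 + (f[j - 1] if j - 1 >= 0 else 0))
--               j -= 1
--       return f[-1]
-- ===== SOURCE B (Python) =====
-- def maxNumberOfBalancedShipments(weight):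
--     n = len(weight)
--     stack = []                    # indices with strictly decreasing weights
--     pmax = [0] * (n + 1)          # pmax[t] = max(0, f[0], ..., f[t-1])
--     f_i = 0
--     for i in range(n):
--         w = weight[i]
--         while stack and weight[stack[-1]] <= w:
--             stack.pop()
--         f_i = (1 + pmax[stack[-1]]) if stack else 0
--         pmax[i + 1] = max(pmax[i], f_i)
--         stack.append(i)
--     return f_i
-- ===== Notes on version B (the rewrite author's own statement) =====
-- stated objective: faster
-- what changed: Replaces A's O(n^2) double scan (for each i, rescan all j<i maintaining a running prefix max) by a single pass that finds the nearest strictly-greater element to the left with a monotonic stack and keeps a running prefix-max array of the DP values, so each f[i] is computed in amortized O(1).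
import Mathlib
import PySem

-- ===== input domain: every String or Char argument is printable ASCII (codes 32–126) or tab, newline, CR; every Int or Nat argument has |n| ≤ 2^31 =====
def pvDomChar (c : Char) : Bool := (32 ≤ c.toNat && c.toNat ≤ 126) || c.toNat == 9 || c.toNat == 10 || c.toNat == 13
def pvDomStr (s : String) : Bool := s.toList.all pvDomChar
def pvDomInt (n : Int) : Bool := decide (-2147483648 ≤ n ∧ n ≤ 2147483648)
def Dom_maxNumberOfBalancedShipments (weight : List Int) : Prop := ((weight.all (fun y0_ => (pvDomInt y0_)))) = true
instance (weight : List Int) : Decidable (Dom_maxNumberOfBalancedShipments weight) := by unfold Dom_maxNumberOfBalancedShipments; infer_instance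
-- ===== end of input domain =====

-- B replaces A's quadratic double scan by a single pass with a monotonic stack
-- (nearest strictly-greater element to the left) plus a running prefix-max of
-- the DP values; same return value on every non-empty list (A raises IndexError on the empty list, which Pre_ excludes).


-- ===== PORT A =====
-- inner `while j >= 0` loop of A: k = j+1 counts the remaining iterations,
-- pm is prefix_max, fi the running value of f[i]; all indices touched are in
-- range, so Python's weight[j] / f[j-1] are List.getD.
def aGo (w f : List Int) (wi : Int) : Nat → Int → Int → Int
  | 0, _, fi => fi
  | j + 1, pm, fi =>
      let pm' := max pm (w.getD j 0)
      let fi' := if pm' > wi then max fi (1 + (if 1 ≤ j then f.getD (j - 1) 0 else 0)) else fi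
      aGo w f wi j pm' fi'

-- outer `for i in range(n)` loop: f[i] is only written at iteration i (the
-- inner loop reads f[j-1] with j-1 < i), so f is built by appending f[i].
def aBuild (w : List Int) : Nat → List Int
  | 0 => []
  | i + 1 =>
      let f := aBuild w i
      f ++ [aGo w f (w.getD i 0) i (w.getD i 0) 0]

def maxNumberOfBalancedShipments (weight : List Int) : Int :=
  (PySem.List.pyGet? (aBuild weight weight.length) (-1)).getD 0  -- Python's final negative-index read; the IndexError case (empty list) is excluded by Pre_

-- ===== PORT B =====
-- `while stack and weight[stack[-1]] <= w: stack.pop()`  (stack held top-first)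
def popWhile (w : List Int) (v : Int) : List Nat → List Nat
  | [] => []
  | t :: rest => if w.getD t 0 ≤ v then popWhile w v rest else t :: rest

-- B's single pass: state after i iterations = (stack, pmax[0..i], f_i)
def bLoop (w : List Int) : Nat → List Nat × List Int × Int
  | 0 => ([], [0], 0)
  | i + 1 =>
      let s := bLoop w i
      let wi := w.getD i 0
      let st' := popWhile w wi s.1
      let fi := match st' with
        | [] => 0
        | g :: _ => 1 + s.2.1.getD g 0
      (i :: st', s.2.1 ++ [max (s.2.1.getD i 0) fi], fi)

def maxNumberOfBalancedShipments_alt (weight : List Int) : Int :=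
  (bLoop weight weight.length).2.2

-- ===== PRECONDITION & SPEC =====
-- Pre_ excludes only the empty list, on which A's final read of the last DP entry raises IndexError (B returns 0 there).
def Pre_maxNumberOfBalancedShipments (weight : List Int) : Prop := weight ≠ []
instance (weight : List Int) : Decidable (Pre_maxNumberOfBalancedShipments weight) := by
  unfold Pre_maxNumberOfBalancedShipments; infer_instance

def pvWitness_maxNumberOfBalancedShipments : List Int := [3, 1]

def Spec_maxNumberOfBalancedShipments (weight : List Int) (out : Int) : Prop := out = maxNumberOfBalancedShipments_alt weight
instance (weight : List Int) (out : Int) : Decidable (Spec_maxNumberOfBalancedShipments weight out) := by unfold Spec_maxNumberOfBalancedShipments; infer_instance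

-- ===== CLAIM (what is proved, stated in full; the proofs are below) =====
def Claim_equal_maxNumberOfBalancedShipments : Prop := ∀ (weight : List Int), Dom_maxNumberOfBalancedShipments weight → Pre_maxNumberOfBalancedShipments weight → Spec_maxNumberOfBalancedShipments weight (maxNumberOfBalancedShipments weight)

-- ===== LEMMAS AND PROOFS =====

-- greatest index k ≤ i with w[k] > v (none if there is no such k)
def gle (w : List Int) (v : Int) : Nat → Option Nat
  | 0 => if w.getD 0 0 > v then some 0 else none
  | i + 1 => if w.getD (i + 1) 0 > v then some (i + 1) else gle w v i

-- greatest index k < i with w[k] > v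
def glt (w : List Int) (v : Int) : Nat → Option Nat
  | 0 => none
  | i + 1 => gle w v i

-- nearest strictly-greater element to the left of i
def gq (w : List Int) (i : Nat) : Option Nat := glt w (w.getD i 0) i

-- max (0, f[0], …, f[t-1])
def bigf (f : List Int) : Nat → Int
  | 0 => 0
  | t + 1 => max (bigf f t) (f.getD t 0)

-- the common specification of the DP values f[0..n-1]:
-- f[i] = 1 + max(0, f[0..g-1]) if the nearest greater g exists, else 0
def FL (w : List Int) : Nat → List Int
  | 0 => []
  | i + 1 =>
      let f := FL w i
      f ++ [match gq w i with | none => 0 | some g => 1 + bigf f g]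

lemma gle_le {w : List Int} {v : Int} : ∀ {i g : Nat}, gle w v i = some g → g ≤ i := by
  intro i
  induction i with
  | zero =>
      intro g h; simp only [gle] at h; split_ifs at h
      exact le_of_eq (Option.some_inj.mp h).symm
  | succ i ih =>
      intro g h
      simp only [gle] at h
      split_ifs at h
      · exact le_of_eq (Option.some_inj.mp h).symm
      · exact Nat.le_succ_of_le (ih h)

lemma gq_lt {w : List Int} {i g : Nat} (h : gq w i = some g) : g < i := by
  cases i with
  | zero => simp [gq, glt] at h
  | succ i => exact Nat.lt_succ_of_le (gle_le h)

lemma gle_none_iff {w : List Int} {v : Int} : ∀ {i : Nat},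
    gle w v i = none ↔ ∀ k ≤ i, w.getD k 0 ≤ v := by
  intro i
  induction i with
  | zero =>
      simp only [gle]
      split_ifs with hgt
      · constructor
        · intro h; exact absurd h (by simp)
        · intro h; exact absurd (h 0 (le_refl 0)) (by omega)
      · constructor
        · intro _ k hk; interval_cases k; omega
        · intro _; rfl
  | succ i ih =>
      simp only [gle]
      split_ifs with hgt
      · constructor
        · intro h; exact absurd h (by simp)
        · intro h; exact absurd (h (i + 1) (le_refl _)) (by omega)
      · constructor
        · intro h k hk
          rcases Nat.lt_or_ge k (i + 1) with hlt | hge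
          · exact ih.mp h k (by omega)
          · have hke : k = i + 1 := by omega
            subst hke; omega
        · intro h; exact ih.mpr (fun k hk => h k (by omega))

-- maximality: every index strictly above the found one has value ≤ v
lemma gle_max {w : List Int} {v : Int} : ∀ {i g : Nat}, gle w v i = some g →
    ∀ k, g < k → k ≤ i → w.getD k 0 ≤ v := by
  intro i
  induction i with
  | zero => intro g h k h1 h2; omega
  | succ i ih =>
      intro g h k h1 h2
      simp only [gle] at h
      split_ifs at h with hgt
      · have : g = i + 1 := by exact (Option.some_inj.mp h).symm
        omega
      · rcases Nat.lt_or_ge k (i + 1) with h3 | h4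
        · exact ih h k h1 (by omega)
        · have : k = i + 1 := by omega
          subst this; omega

-- skipping elements known to be ≤ v does not change gle
lemma gle_skip {w : List Int} {v : Int} : ∀ (b a : Nat), a ≤ b →
    (∀ k, a < k → k ≤ b → w.getD k 0 ≤ v) → gle w v b = gle w v a := by
  intro b
  induction b with
  | zero => intro a ha _; interval_cases a; rfl
  | succ b ih =>
      intro a ha hsk
      rcases Nat.lt_or_ge a (b + 1) with hlt | hge
      · have hb : w.getD (b + 1) 0 ≤ v := hsk (b + 1) (by omega) (le_refl _)
        have hstep : gle w v (b + 1) = gle w v b := by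
          simp only [gle]; split_ifs with hgt
          · omega
          · rfl
        rw [hstep]
        exact ih a (by omega) (fun k h1 h2 => hsk k h1 (by omega))
      · have : a = b + 1 := by omega
        subst this; rfl

lemma bigf_nonneg (f : List Int) : ∀ t, 0 ≤ bigf f t := by
  intro t
  induction t with
  | zero => simp [bigf]
  | succ t ih => simp only [bigf]; exact le_max_of_le_left ih

lemma bigf_append (f s : List Int) : ∀ t, t ≤ f.length → bigf (f ++ s) t = bigf f t := by
  intro t
  induction t with
  | zero => intro _; rfl
  | succ t ih =>
      intro h
      simp only [bigf, ih (by omega)]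
      have : (f ++ s).getD t 0 = f.getD t 0 := by
        simp [List.getD, List.getElem?_append_left (show t < f.length by omega)]
      rw [this]

lemma FL_length (w : List Int) : ∀ n, (FL w n).length = n := by
  intro n
  induction n with
  | zero => rfl
  | succ n ih => simp [FL, ih]

lemma FL_prefix (w : List Int) : ∀ n m, m ≤ n → ∃ s, FL w n = FL w m ++ s := by
  intro n
  induction n with
  | zero => intro m h; interval_cases m; exact ⟨[], rfl⟩
  | succ n ih =>
      intro m h
      rcases Nat.lt_or_ge m (n + 1) with hlt | hge
      · obtain ⟨s, hs⟩ := ih m (by omega)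
        refine ⟨s ++ [match gq w n with | none => 0 | some g => 1 + bigf (FL w n) g], ?_⟩
        simp only [FL]
        rw [hs]
        simp
      · have : m = n + 1 := by omega
        subst this; exact ⟨[], by simp⟩

lemma bigf_FL_stable (w : List Int) {n m t : Nat} (hmn : m ≤ n) (ht : t ≤ m) :
    bigf (FL w n) t = bigf (FL w m) t := by
  obtain ⟨s, hs⟩ := FL_prefix w n m hmn
  rw [hs, bigf_append _ _ t (by rw [FL_length]; exact ht)]

-- characterization of A's inner loop
lemma aGo_spec (w f : List Int) (wi : Int) : ∀ (k : Nat) (pm fi : Int),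
    aGo w f wi k pm fi =
      if pm > wi then
        (match k with | 0 => fi | k' + 1 => max fi (1 + bigf f k'))
      else
        (match glt w wi k with | none => fi | some g => max fi (1 + bigf f g)) := by
  intro k
  induction k with
  | zero =>
      intro pm fi
      simp only [aGo, glt]
      split_ifs <;> rfl
  | succ k ih =>
      intro pm fi
      rw [show aGo w f wi (k + 1) pm fi =
          aGo w f wi k (max pm (w.getD k 0))
            (if max pm (w.getD k 0) > wi
             then max fi (1 + (if 1 ≤ k then f.getD (k - 1) 0 else 0)) else fi) from rfl, ih]
      by_cases hpm' : max pm (w.getD k 0) > wi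
      · simp only [if_pos hpm']
        by_cases hpm : pm > wi
        · rw [if_pos hpm]
          cases k with
          | zero =>
              show max fi (1 + (if 1 ≤ 0 then f.getD (0 - 1) 0 else 0)) = max fi (1 + bigf f 0)
              rw [if_neg (by omega : ¬ (1:Nat) ≤ 0)]
              rfl
          | succ k'' =>
              show max (max fi (1 + (if 1 ≤ k'' + 1 then f.getD (k'' + 1 - 1) 0 else 0)))
                  (1 + bigf f k'') = max fi (1 + bigf f (k'' + 1))
              rw [if_pos (by omega : (1:Nat) ≤ k'' + 1), Nat.add_sub_cancel]
              show max (max fi (1 + f.getD k'' 0)) (1 + bigf f k'')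
                  = max fi (1 + max (bigf f k'') (f.getD k'' 0))
              omega
        · rw [if_neg hpm]
          have hk : w.getD k 0 > wi := by
            rcases max_cases pm (w.getD k 0) with ⟨he, _⟩ | ⟨he, _⟩ <;> omega
          have hg : glt w wi (k + 1) = some k := by
            cases k with
            | zero => simp only [glt, gle]; rw [if_pos hk]
            | succ k' => simp only [glt, gle]; rw [if_pos hk]
          rw [hg]
          cases k with
          | zero =>
              show max fi (1 + (if 1 ≤ 0 then f.getD (0 - 1) 0 else 0)) = max fi (1 + bigf f 0)
              rw [if_neg (by omega : ¬ (1:Nat) ≤ 0)]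
              rfl
          | succ k'' =>
              show max (max fi (1 + (if 1 ≤ k'' + 1 then f.getD (k'' + 1 - 1) 0 else 0)))
                  (1 + bigf f k'') = max fi (1 + bigf f (k'' + 1))
              rw [if_pos (by omega : (1:Nat) ≤ k'' + 1), Nat.add_sub_cancel]
              show max (max fi (1 + f.getD k'' 0)) (1 + bigf f k'')
                  = max fi (1 + max (bigf f k'') (f.getD k'' 0))
              omega
      · simp only [if_neg hpm']
        have hpm : ¬ pm > wi := by
          rcases max_cases pm (w.getD k 0) with ⟨he, _⟩ | ⟨he, _⟩ <;> omega
        have hk : ¬ w.getD k 0 > wi := by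
          rcases max_cases pm (w.getD k 0) with ⟨he, _⟩ | ⟨he, _⟩ <;> omega
        rw [if_neg hpm]
        have hg : glt w wi (k + 1) = glt w wi k := by
          cases k with
          | zero => simp only [glt, gle]; rw [if_neg hk]
          | succ k' => simp only [glt, gle]; rw [if_neg hk]
        rw [hg]

-- A computes exactly the specification list FL
lemma aBuild_eq_FL (w : List Int) : ∀ n, aBuild w n = FL w n := by
  intro n
  induction n with
  | zero => rfl
  | succ n ih =>
      simp only [aBuild, FL, ih]
      congr 1
      rw [aGo_spec]
      rw [if_neg (by omega : ¬ w.getD n 0 > w.getD n 0)]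
      rw [show glt w (w.getD n 0) n = gq w n from rfl]
      cases hg : gq w n with
      | none => rfl
      | some g =>
          have h0 := bigf_nonneg (FL w n) g
          have hmax : max 0 (1 + bigf (FL w n) g) = 1 + bigf (FL w n) g := by omega
          show [max 0 (1 + bigf (FL w n) g)] = [1 + bigf (FL w n) g]
          rw [hmax]

-- the t-th DP value
def Fv (w : List Int) (t : Nat) : Int :=
  match gq w t with | none => 0 | some g => 1 + bigf (FL w t) g

lemma FL_succ (w : List Int) (i : Nat) : FL w (i + 1) = FL w i ++ [Fv w i] := rfl

-- max(0, f[0..t-1]) of the final DP values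
def bigF (w : List Int) (t : Nat) : Int := bigf (FL w t) t

-- chain of nearest-greater jumps starting at i = content of B's stack
def chain (w : List Int) (i : Nat) : List Nat :=
  i :: (match h : gq w i with
        | none => []
        | some g => chain w g)
termination_by i
decreasing_by exact gq_lt h

lemma chain_def (w : List Int) (i : Nat) :
    chain w i = i :: (match gq w i with | none => [] | some g => chain w g) := by
  rw [chain]
  congr 1
  split <;> simp_all

-- popping the stack finds the nearest element > v
lemma popWhile_chain (w : List Int) (v : Int) : ∀ (i : Nat),
    popWhile w v (chain w i) =
      (match gle w v i with | none => [] | some g => chain w g) := by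
  intro i
  induction i using Nat.strong_induction_on with
  | _ i ih =>
      rw [chain_def]
      by_cases hi : w.getD i 0 > v
      · have hg : gle w v i = some i := by
          cases i with
          | zero => simp only [gle]; rw [if_pos hi]
          | succ i' => simp only [gle]; rw [if_pos hi]
        rw [hg]
        simp only [popWhile]
        rw [if_neg (by omega : ¬ w.getD i 0 ≤ v)]
        rw [chain_def]
      · simp only [popWhile]
        rw [if_pos (by omega)]
        cases hgq : gq w i with
        | none =>
            simp only [popWhile]
            have : gle w v i = none := by
              cases i with
              | zero =>
                  simp only [gle]; rw [if_neg hi]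
              | succ i' =>
                  have hnone : gle w (w.getD (i' + 1) 0) i' = none := hgq
                  apply gle_none_iff.mpr
                  intro k hk
                  rcases Nat.lt_or_ge k (i' + 1) with h1 | h2
                  · exact le_trans (gle_none_iff.mp hnone k (by omega)) (by omega)
                  · have : k = i' + 1 := by omega
                    subst this; omega
            rw [this]
        | some g =>
            rw [ih g (gq_lt hgq)]
            have : gle w v i = gle w v g := by
              cases i with
              | zero => simp [gq, glt] at hgq
              | succ i' =>
                  have hgle : gle w (w.getD (i' + 1) 0) i' = some g := hgq
                  have hgi : g ≤ i' := gle_le hgle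
                  have hle : ∀ k, g < k → k ≤ i' + 1 → w.getD k 0 ≤ v := by
                    intro k h1 h2
                    rcases Nat.lt_or_ge k (i' + 1) with h3 | h4
                    · exact le_trans (gle_max hgle k h1 (by omega)) (by omega)
                    · have : k = i' + 1 := by omega
                      subst this; omega
                  exact gle_skip (i' + 1) g (by omega) hle
            rw [this]

lemma getD_map_range' {α : Type} (f : Nat → α) (d : α) (n t : Nat) (h : t < n) :
    ((List.range n).map f).getD t d = f t := by
  rw [List.getD, List.getElem?_map]
  simp [List.getElem?_range h]

-- B's loop invariant: after i iterations the stack is the nearest-greater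
-- chain from i-1, the pmax list holds bigF w 0 .. bigF w i, and f_i = Fv w (i-1)
lemma bLoop_spec (w : List Int) : ∀ i,
    bLoop w i = (if i = 0 then [] else chain w (i - 1),
                 (List.range (i + 1)).map (bigF w),
                 if i = 0 then 0 else Fv w (i - 1)) := by
  intro i
  induction i with
  | zero =>
      show ([], [0], 0) = _
      simp [List.range_succ, bigF, bigf]
  | succ i ih =>
      show (let s := bLoop w i;
            let wi := w.getD i 0;
            let st' := popWhile w wi s.1;
            let fi := match st' with
              | [] => 0
              | g :: _ => 1 + s.2.1.getD g 0
            (i :: st', s.2.1 ++ [max (s.2.1.getD i 0) fi], fi)) = _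
      simp only [ih]
      have hst' : popWhile w (w.getD i 0) (if i = 0 then [] else chain w (i - 1)) =
          (match gq w i with | none => [] | some g => chain w g) := by
        cases i with
        | zero => rfl
        | succ i' =>
            rw [if_neg (by omega : ¬ i' + 1 = 0)]
            have : (i' + 1) - 1 = i' := rfl
            rw [this, popWhile_chain w (w.getD (i' + 1) 0) i']
            rfl
      simp only [hst']
      have hpmget : ∀ t, t < i + 1 → ((List.range (i + 1)).map (bigF w)).getD t 0 = bigF w t :=
        fun t ht => getD_map_range' (bigF w) 0 (i + 1) t ht
      have hfi : (match (match gq w i with | none => [] | some g => chain w g) with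
            | [] => 0
            | g :: _ => 1 + ((List.range (i + 1)).map (bigF w)).getD g 0) = Fv w i := by
        cases hgq : gq w i with
        | none => simp only [Fv, hgq]
        | some g =>
            have hlt : g < i := gq_lt hgq
            show (match chain w g with
              | [] => 0
              | g' :: _ => 1 + ((List.range (i + 1)).map (bigF w)).getD g' 0) = Fv w i
            rw [chain_def]
            show 1 + ((List.range (i + 1)).map (bigF w)).getD g 0 = Fv w i
            rw [hpmget g (by omega)]
            simp only [Fv, hgq]
            have : bigF w g = bigf (FL w i) g := (bigf_FL_stable w (by omega) (le_refl g)).symm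
            rw [this]
      simp only [hfi]
      refine Prod.ext ?_ (Prod.ext ?_ ?_)
      · show i :: _ = chain w i
        rw [chain_def]
      · show (List.range (i + 1)).map (bigF w) ++ [max (((List.range (i + 1)).map (bigF w)).getD i 0) (Fv w i)]
            = (List.range (i + 1 + 1)).map (bigF w)
        rw [hpmget i (by omega)]
        rw [List.range_succ (n := i + 1), List.map_append]
        congr 1
        show [max (bigF w i) (Fv w i)] = [bigF w (i + 1)]
        congr 1
        show max (bigF w i) (Fv w i) = bigf (FL w (i + 1)) (i + 1)
        have h1 : bigf (FL w (i + 1)) (i + 1)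
            = max (bigf (FL w (i + 1)) i) ((FL w (i + 1)).getD i 0) := rfl
        have h2 : bigf (FL w (i + 1)) i = bigF w i := bigf_FL_stable w (by omega) (le_refl i)
        have h3 : (FL w (i + 1)).getD i 0 = Fv w i := by
          have hlen : (FL w i).length = i := FL_length w i
          rw [FL_succ, List.getD, List.getElem?_append_right (by omega), hlen]
          simp
        rw [h1, h2, h3]
      · show Fv w i = _
        rfl

-- ===== VERDICT (by name: the statement is the Claim_ definition above) =====
theorem maxNumberOfBalancedShipments_spec : Claim_equal_maxNumberOfBalancedShipments := by
  intro w _ hpre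
  unfold Spec_maxNumberOfBalancedShipments
  unfold maxNumberOfBalancedShipments maxNumberOfBalancedShipments_alt
  cases hn : w.length with
  | zero => exact absurd (List.length_eq_zero_iff.mp hn) hpre
  | succ m =>
      rw [aBuild_eq_FL, bLoop_spec]
      rw [FL_succ]
      rw [PySem.List.pyGet?_neg_one_append_singleton]
      rw [if_neg (by omega : ¬ m + 1 = 0)]
      rfl
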